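-- pv_equiv track=rewrite | github.com/Kawser-nerd/CLCDSA | Source Codes/AtCoder/arc012/C/1808400.py | solve
-- ===== SOURCE A (Python) =====
-- def inside(y: int, x: int, H: int, W: int) -> bool: return 0 <= y < H and 0 <= x < W
--
-- def func(board, p):
--     ans = 0
--     for i in range(19):
--         n = 0
--         for x in range(19):
--             if board[i][x] == p:
--                 n += 1
--             else:
--                 ans = max(ans, n)
--                 n = 0
--         ans = max(ans, n)
--
--         n = 0
--         for y in range(19):
--             if board[y][i] == p:
--                 n += 1
--             else:
--                 ans = max(ans, n)
--                 n = 0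
--         ans = max(ans, n)
--
--     for y in range(19):
--         for x in range(19):
--             ny, nx = y, x
--             n = 0
--             while inside(ny, nx, 19, 19):
--                 if board[ny][nx] == p:
--                     n += 1
--                 else:
--                     ans = max(ans, n)
--                     n = 0
--                 ny, nx = ny + 1, nx + 1
--             ans = max(ans, n)
--
--             ny, nx = y, x
--             n = 0
--             while inside(ny, nx, 19, 19):
--                 if board[ny][nx] == p:
--                     n += 1
--                 else:
--                     ans = max(ans, n)
--                     n = 0
--                 ny, nx = ny + 1, nx - 1
--             ans = max(ans, n)
--     return ans
--
-- def solve(b, w, board):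
--     if b != w and b != w + 1:
--         return False
--     if b == 0 and w == 0:
--         return True
--
--     win = "x" if b == w else "o"
--     lose = "o" if b == w else "x"
--
--     if func(board, lose) >= 5:
--         return False
--     for y in range(19):
--         for x in range(19):
--             if board[y][x] != win:
--                 continue
--             board[y][x] = "."
--             if func(board, win) < 5:
--                 return True
--             board[y][x] = win
--
--     return False
-- ===== SOURCE B (Python) =====
-- # B: run-length DP. For each of the four direction vectors, fill a table
-- # run[(y, x)] = run[predecessor] + 1 (0 outside) in row-major order and track
-- # the global maximum, instead of A's per-cell line walks.  Pure: unlike A,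
-- # solve never mutates board (equivalence is about the return value).
--
-- def _maxrun(board, p, sy=-1, sx=-1):
--     best = 0
--     for dy, dx in ((0, 1), (1, 0), (1, 1), (1, -1)):
--         run = {}
--         for y in range(19):
--             for x in range(19):
--                 if board[y][x] == p and (y, x) != (sy, sx):
--                     r = run.get((y - dy, x - dx), 0) + 1
--                 else:
--                     r = 0
--                 run[(y, x)] = r
--                 if r > best:
--                     best = r
--     return best
--
-- def solve(b, w, board):
--     if b != w and b != w + 1:
--         return False
--     if b == 0 and w == 0:
--         return True
--     win = "x" if b == w else "o"
--     lose = "o" if b == w else "x"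
--     if _maxrun(board, lose) >= 5:
--         return False
--     return any(board[y][x] == win and _maxrun(board, win, y, x) < 5
--                for y in range(19) for x in range(19))
-- ===== Notes on version B (the rewrite author's own statement) =====
-- stated objective: alternative
-- what changed: func's per-cell line walks (an (ans,n) reset-scan restarted from every cell, so diagonals are rescanned from each of the 361 cells) are replaced by a run-length dynamic-programming table per direction vector filled once in row-major order (run[y,x] = run[pred]+1, tracking the global maximum), and the stone-removal search passes a skip coordinate to the scorer instead of mutating board in place and restoring it.
import Mathlib
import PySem

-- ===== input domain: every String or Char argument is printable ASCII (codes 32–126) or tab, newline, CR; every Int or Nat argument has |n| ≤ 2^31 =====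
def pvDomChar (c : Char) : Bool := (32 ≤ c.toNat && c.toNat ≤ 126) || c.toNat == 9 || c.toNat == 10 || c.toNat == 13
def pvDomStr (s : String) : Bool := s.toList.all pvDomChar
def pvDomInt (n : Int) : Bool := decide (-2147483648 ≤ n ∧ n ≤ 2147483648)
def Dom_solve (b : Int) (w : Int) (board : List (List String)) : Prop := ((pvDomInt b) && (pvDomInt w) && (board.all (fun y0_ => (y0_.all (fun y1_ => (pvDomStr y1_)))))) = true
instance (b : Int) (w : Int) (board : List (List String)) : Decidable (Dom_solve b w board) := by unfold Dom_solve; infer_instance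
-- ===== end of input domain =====

-- B replaces func's per-cell line walks by a run-length DP table per direction (run[y,x] = run[pred]+1,
-- one row-major pass) and a pure skip-parameter scan instead of A's mutate-and-restore; A mutates board
-- in place during the search (left altered when it returns True early) — the equivalence proved here is
-- about the return value only (B never mutates).

-- ===== PORT A =====
-- board[y][x] for the in-range accesses Pre_solve admits (Python raises IndexError out of range).
def pvGet (board : List (List String)) (y x : Int) : String :=
  if 0 ≤ y ∧ 0 ≤ x then (board.getD y.toNat []).getD x.toNat "" else ""

-- the two `while inside(ny, nx, 19, 19):` loops of func (dx = +1 / -1), state (ans, n)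
def pvWhileA (cf : Int → Int → Bool) (dx : Int) (ny nx an n : Int) : Int × Int :=
  if h : 0 ≤ ny ∧ ny < 19 ∧ 0 ≤ nx ∧ nx < 19 then
    if cf ny nx then pvWhileA cf dx (ny + 1) (nx + dx) an (n + 1)
    else pvWhileA cf dx (ny + 1) (nx + dx) (max an n) 0
  else (an, n)
termination_by (19 - ny).toNat
decreasing_by all_goals omega

-- func(board, p), literally, over the cell test cf y x = (board[y][x] == p)
def pvFuncA (cf : Int → Int → Bool) : Int :=
  let ans := (PySem.List.pyRange 0 19 1).foldl (fun ans i =>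
    let p1 := (PySem.List.pyRange 0 19 1).foldl
      (fun s x => if cf i x then (s.1, s.2 + 1) else (max s.1 s.2, 0)) (ans, 0)
    let a1 := max p1.1 p1.2
    let p2 := (PySem.List.pyRange 0 19 1).foldl
      (fun s y => if cf y i then (s.1, s.2 + 1) else (max s.1 s.2, 0)) (a1, 0)
    max p2.1 p2.2) 0
  (PySem.List.pyRange 0 19 1).foldl (fun ans y =>
    (PySem.List.pyRange 0 19 1).foldl (fun ans x =>
      let q1 := pvWhileA cf 1 y x ans 0
      let a1 := max q1.1 q1.2
      let q2 := pvWhileA cf (-1) y x a1 0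
      max q2.1 q2.2) ans) ans

def funcA (board : List (List String)) (p : String) : Int :=
  pvFuncA (fun y x => pvGet board y x == p)

-- board[y][x] = s (the in-place assignment, modelled functionally)
def pvSet (board : List (List String)) (y x : Int) (s : String) : List (List String) :=
  board.mapIdx (fun i row =>
    if (i : Int) = y then row.mapIdx (fun j c => if (j : Int) = x then s else c) else row)

def solve (b : Int) (w : Int) (board : List (List String)) : Bool :=
  if b ≠ w ∧ b ≠ w + 1 then false
  else if b = 0 ∧ w = 0 then true
  else
    let win := if b = w then "x" else "o"
    let lose := if b = w then "o" else "x"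
    if funcA board lose ≥ 5 then false
    else
      (PySem.List.pyRange 0 19 1).foldl (fun found y =>
        (PySem.List.pyRange 0 19 1).foldl (fun found x =>
          if found then found
          else if ¬ (pvGet board y x == win) then found
          else if funcA (pvSet board y x ".") win < 5 then true
          else found) found) false

-- ===== PORT B =====

-- _maxrun(board, p, sy, sx): four direction vectors, a run-length table filled row-major,
-- global maximum tracked in best
def pvStepB (cf : Int → Int → Bool) (dy dx y : Int)
    (st : PySem.Dict (Int × Int) Int × Int) (x : Int) : PySem.Dict (Int × Int) Int × Int :=
  let r := if cf y x then st.1.getD (y - dy, x - dx) 0 + 1 else 0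
  (st.1.insert (y, x) r, if r > st.2 then r else st.2)

def pvFuncB (cf : Int → Int → Bool) : Int :=
  ([((0 : Int), (1 : Int)), (1, 0), (1, 1), (1, -1)]).foldl (fun best d =>
    ((PySem.List.pyRange 0 19 1).foldl (fun st y =>
      (PySem.List.pyRange 0 19 1).foldl (pvStepB cf d.1 d.2 y) st)
      (PySem.Dict.empty, best)).2) 0

def funcB (board : List (List String)) (p : String) (sy sx : Int) : Int :=
  pvFuncB (fun y x => pvGet board y x == p && !(y == sy && x == sx))

def solve_alt (b : Int) (w : Int) (board : List (List String)) : Bool :=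
  if b ≠ w ∧ b ≠ w + 1 then false
  else if b = 0 ∧ w = 0 then true
  else
    let win := if b = w then "x" else "o"
    let lose := if b = w then "o" else "x"
    if funcB board lose (-1) (-1) ≥ 5 then false
    else
      (PySem.List.pyRange 0 19 1).any (fun y =>
        (PySem.List.pyRange 0 19 1).any (fun x =>
          pvGet board y x == win && decide (funcB board win y x < 5)))

-- ===== PRECONDITION & SPEC =====
-- Pre_solve excludes exactly the inputs on which the Python A raises IndexError: a board smaller
-- than 19×19 reached by func (i.e. not dismissed by the two initial count guards).
def Pre_solve (b : Int) (w : Int) (board : List (List String)) : Prop :=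
  (b ≠ w ∧ b ≠ w + 1) ∨ (b = 0 ∧ w = 0) ∨
    (19 ≤ board.length ∧ ∀ row ∈ board.take 19, 19 ≤ row.length)
instance (b : Int) (w : Int) (board : List (List String)) : Decidable (Pre_solve b w board) := by
  unfold Pre_solve; infer_instance

def pvWitness_solve : Int × Int × List (List String) := (5, 1, [])

def Spec_solve (b : Int) (w : Int) (board : List (List String)) (out : Bool) : Prop := out = solve_alt b w board
instance (b : Int) (w : Int) (board : List (List String)) (out : Bool) : Decidable (Spec_solve b w board out) := by unfold Spec_solve; infer_instance

-- ===== CLAIM (what is proved, stated in full; the proofs are below) =====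
def Claim_equal_solve : Prop := ∀ (b : Int) (w : Int) (board : List (List String)), Dom_solve b w board → Pre_solve b w board → Spec_solve b w board (solve b w board)

-- ===== LEMMAS AND PROOFS =====

inductive PvDir | h | v | d | a
deriving DecidableEq, Repr
def pvDy : PvDir → Int | .h => 0 | .v => 1 | .d => 1 | .a => 1
def pvDx : PvDir → Int | .h => 1 | .v => 0 | .d => 1 | .a => -1
abbrev pvIns (y x : Int) : Prop := 0 ≤ y ∧ y < 19 ∧ 0 ≤ x ∧ x < 19
def pvR (cf : Int → Int → Bool) (D : PvDir) (y x : Int) : Int :=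
  if h : pvIns y x ∧ cf y x = true then
    (if h2 : pvIns (y - pvDy D) (x - pvDx D) then pvR cf D (y - pvDy D) (x - pvDx D) else 0) + 1
  else 0
termination_by (40 * y + x).toNat
decreasing_by cases D <;> simp [pvDy, pvDx] at * <;> omega
theorem pvR_nonneg (cf : Int → Int → Bool) (D : PvDir) (y x : Int) : 0 ≤ pvR cf D y x := by
  fun_induction pvR <;> (try split_ifs) <;> omega

def pvRp (cf : Int → Int → Bool) (D : PvDir) (y x : Int) : Int :=
  if pvIns (y - pvDy D) (x - pvDx D) then pvR cf D (y - pvDy D) (x - pvDx D) else 0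

def pvScan (cf : Int → Int → Bool) (D : PvDir) (y x n : Int) : Int :=
  if h : pvIns y x then
    if cf y x then pvScan cf D (y + pvDy D) (x + pvDx D) (n + 1)
    else max n (pvScan cf D (y + pvDy D) (x + pvDx D) 0)
  else n
termination_by (40 * (19 - y) + (20 - x)).toNat
decreasing_by all_goals cases D <;> simp [pvDy, pvDx] at * <;> omega

def pvMaxRay (cf : Int → Int → Bool) (D : PvDir) (y x : Int) : Int :=
  if h : pvIns y x then max (pvR cf D y x) (pvMaxRay cf D (y + pvDy D) (x + pvDx D)) else 0
termination_by (40 * (19 - y) + (20 - x)).toNat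
decreasing_by all_goals cases D <;> simp [pvDy, pvDx] at * <;> omega

theorem pvRp_nonneg (cf : Int → Int → Bool) (D : PvDir) (y x : Int) : 0 ≤ pvRp cf D y x := by
  unfold pvRp; split
  · exact pvR_nonneg _ _ _ _
  · exact le_refl 0

theorem pvRp_next (cf : Int → Int → Bool) (D : PvDir) (y x : Int) (hins : pvIns y x) :
    pvRp cf D (y + pvDy D) (x + pvDx D) = pvR cf D y x := by
  unfold pvRp; simp [hins]

theorem pvR_eq_rp_add_one (cf : Int → Int → Bool) (D : PvDir) (y x : Int)
    (hins : pvIns y x) (hcf : cf y x = true) : pvR cf D y x = pvRp cf D y x + 1 := by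
  rw [pvR]; unfold pvRp; simp [hins, hcf]

theorem pvR_eq_zero (cf : Int → Int → Bool) (D : PvDir) (y x : Int)
    (h : ¬(pvIns y x ∧ cf y x = true)) : pvR cf D y x = 0 := by
  rw [pvR]; simp only [dif_neg h]

theorem pvScan_mono (cf : Int → Int → Bool) (D : PvDir) (y x n : Int) :
    ∀ n', n ≤ n' → pvScan cf D y x n ≤ pvScan cf D y x n' := by
  fun_induction pvScan cf D y x n with
  | case1 y x n hins hcf ih =>
    intro n' hle
    conv_rhs => rw [pvScan]
    simp only [dif_pos hins, if_pos hcf]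
    exact ih _ (by omega)
  | case2 y x n hins hcf ih =>
    intro n' hle
    conv_rhs => rw [pvScan]
    simp only [dif_pos hins, if_neg hcf]
    exact max_le_max hle (le_refl _)
  | case3 y x n hins =>
    intro n' hle
    conv_rhs => rw [pvScan]
    simp only [dif_neg hins]; exact hle

theorem pvScan_rp (cf : Int → Int → Bool) (D : PvDir) (y x : Int) :
    pvScan cf D y x (pvRp cf D y x) = max (pvRp cf D y x) (pvMaxRay cf D y x) := by
  fun_induction pvMaxRay cf D y x with
  | case1 y x hins ih =>
    rw [pvScan]; simp only [dif_pos hins]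
    by_cases hcf : cf y x = true
    · rw [if_pos hcf]
      have h1 : pvRp cf D y x + 1 = pvR cf D y x := (pvR_eq_rp_add_one cf D y x hins hcf).symm
      have h2 : pvR cf D y x = pvRp cf D (y + pvDy D) (x + pvDx D) := (pvRp_next cf D y x hins).symm
      rw [h1, h2, ih, ← h2]
      have h3 : pvRp cf D y x ≤ pvR cf D y x := by
        rw [pvR_eq_rp_add_one cf D y x hins hcf]; omega
      rw [max_eq_right (le_trans h3 (le_max_left _ _))]
    · rw [if_neg hcf]
      have h0 : pvR cf D y x = 0 := pvR_eq_zero cf D y x (by tauto)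
      have h2 : pvRp cf D (y + pvDy D) (x + pvDx D) = 0 := by rw [pvRp_next cf D y x hins, h0]
      rw [← h2, ih, h2, h0]
  | case2 y x hins =>
    rw [pvScan]; simp only [dif_neg hins]
    exact (max_eq_left (pvRp_nonneg cf D y x)).symm

def pvDirs : List PvDir := [.h, .v, .d, .a]

def pvMspec (cf : Int → Int → Bool) : Int :=
  pvDirs.foldl (fun m D =>
    (PySem.List.pyRange 0 19 1).foldl (fun m y =>
      (PySem.List.pyRange 0 19 1).foldl (fun m x => max m (pvR cf D y x)) m) m) 0

theorem pvMaxRay_le (cf : Int → Int → Bool) (D : PvDir) (y x B : Int) (h0 : 0 ≤ B)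
    (hB : ∀ y' x', pvIns y' x' → pvR cf D y' x' ≤ B) : pvMaxRay cf D y x ≤ B := by
  fun_induction pvMaxRay cf D y x with
  | case1 y x hins ih => exact max_le (hB _ _ hins) ih
  | case2 y x hins => exact h0

theorem pvR_le_maxRay (cf : Int → Int → Bool) (D : PvDir) (y x : Int) (hins : pvIns y x) :
    pvR cf D y x ≤ pvMaxRay cf D y x := by
  rw [pvMaxRay]; simp only [dif_pos hins]; exact le_max_left _ _

theorem pvMaxRay_step (cf : Int → Int → Bool) (D : PvDir) (y x : Int) (hins : pvIns y x) :
    pvMaxRay cf D (y + pvDy D) (x + pvDx D) ≤ pvMaxRay cf D y x := by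
  conv_rhs => rw [pvMaxRay]
  simp only [dif_pos hins]; exact le_max_right _ _

theorem pvMaxRay_chain (cf : Int → Int → Bool) (D : PvDir) (k : Nat) :
    ∀ y x : Int, (∀ j : Nat, j ≤ k → pvIns (y + j * pvDy D) (x + j * pvDx D)) →
    pvMaxRay cf D (y + k * pvDy D) (x + k * pvDx D) ≤ pvMaxRay cf D y x := by
  induction k with
  | zero => intro y x _; simp
  | succ k ih =>
    intro y x hall
    have h0 : pvIns y x := by have := hall 0 (by omega); simpa using this
    have step := pvMaxRay_step cf D y x h0
    have hall' : ∀ j : Nat, j ≤ k → pvIns ((y + pvDy D) + j * pvDy D) ((x + pvDx D) + j * pvDx D) := by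
      intro j hj
      have := hall (j + 1) (by omega)
      have e1 : y + (j + 1 : Nat) * pvDy D = (y + pvDy D) + j * pvDy D := by push_cast; ring
      have e2 : x + (j + 1 : Nat) * pvDx D = (x + pvDx D) + j * pvDx D := by push_cast; ring
      rwa [e1, e2] at this
    have := ih (y + pvDy D) (x + pvDx D) hall'
    have e1 : y + (k + 1 : Nat) * pvDy D = (y + pvDy D) + k * pvDy D := by push_cast; ring
    have e2 : x + (k + 1 : Nat) * pvDx D = (x + pvDx D) + k * pvDx D := by push_cast; ring
    rw [e1, e2]
    exact le_trans this step

-- generic fold-max helpers for the nested loops of both ports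
theorem pvFoldGe {α : Type} (l : List α) (step : Int → α → Int)
    (hmono : ∀ m a, m ≤ step m a) : ∀ i : Int, i ≤ l.foldl step i := by
  induction l with
  | nil => intro i; exact le_refl i
  | cons a t ih => intro i; exact le_trans (hmono i a) (ih (step i a))

theorem pvFoldGeMem {α : Type} (l : List α) (step : Int → α → Int)
    (hmono : ∀ m a, m ≤ step m a) (a : α) (ha : a ∈ l) (v : Int)
    (hv : ∀ m, v ≤ step m a) : ∀ i : Int, v ≤ l.foldl step i := by
  induction l with
  | nil => cases ha
  | cons b t ih =>
    intro i
    rcases List.mem_cons.mp ha with rfl | hmem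
    · exact le_trans (hv i) (pvFoldGe t step hmono _)
    · exact ih hmem _

theorem pvFoldLe {α : Type} (l : List α) (step : Int → α → Int) (B : Int)
    (hstep : ∀ m a, a ∈ l → m ≤ B → step m a ≤ B) : ∀ i : Int, i ≤ B → l.foldl step i ≤ B := by
  induction l with
  | nil => intro i hi; exact hi
  | cons a t ih =>
    intro i hi
    exact ih (fun m b hb hm => hstep m b (List.mem_cons_of_mem a hb) hm) _
      (hstep i a List.mem_cons_self hi)

theorem pvMspec_nonneg (cf : Int → Int → Bool) : 0 ≤ pvMspec cf := by
  unfold pvMspec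
  apply pvFoldGe
  intro m D
  apply pvFoldGe
  intro m y
  exact (PySem.List.le_foldl_max_int _ _ _).1

theorem pvMspec_ge (cf : Int → Int → Bool) (D : PvDir) (y x : Int) (hins : pvIns y x) :
    pvR cf D y x ≤ pvMspec cf := by
  unfold pvMspec
  obtain ⟨hy0, hy1, hx0, hx1⟩ := hins
  refine pvFoldGeMem _ _ ?mono1 D ?mem1 _ ?v1 0
  case mono1 =>
    intro m D'
    apply pvFoldGe
    intro m' y'
    exact (PySem.List.le_foldl_max_int _ _ _).1
  case mem1 => cases D <;> simp [pvDirs]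
  case v1 =>
    intro m
    refine pvFoldGeMem _ _ ?mono2 y ?mem2 _ ?v2 m
    case mono2 =>
      intro m' y'
      exact (PySem.List.le_foldl_max_int _ _ _).1
    case mem2 => rw [PySem.List.mem_pyRange_one]; omega
    case v2 =>
      intro m'
      exact (PySem.List.le_foldl_max_int _ _ _).2 x (by rw [PySem.List.mem_pyRange_one]; omega)

theorem pvScan0_le_Mspec (cf : Int → Int → Bool) (D : PvDir) (y x : Int) :
    pvScan cf D y x 0 ≤ pvMspec cf := by
  have h1 : pvScan cf D y x 0 ≤ pvScan cf D y x (pvRp cf D y x) :=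
    pvScan_mono cf D y x 0 _ (pvRp_nonneg cf D y x)
  rw [pvScan_rp] at h1
  have hrp : pvRp cf D y x ≤ pvMspec cf := by
    unfold pvRp; split
    · exact pvMspec_ge cf D _ _ (by assumption)
    · exact pvMspec_nonneg cf
  have hmr : pvMaxRay cf D y x ≤ pvMspec cf :=
    pvMaxRay_le cf D y x _ (pvMspec_nonneg cf) (fun y' x' h => pvMspec_ge cf D y' x' h)
  exact le_trans h1 (max_le hrp hmr)

theorem pvRowScan (cf : Int → Int → Bool) (i : Int) (hi0 : 0 ≤ i) (hi1 : i < 19) :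
    ∀ (k : Nat) (lo : Int), lo = 19 - (k : Int) → 0 ≤ lo → ∀ a n : Int,
    (((PySem.List.pyRange lo 19 1).foldl
        (fun s x => if cf i x then (s.1, s.2 + 1) else (max s.1 s.2, 0)) (a, n)).1) ⊔
      (((PySem.List.pyRange lo 19 1).foldl
        (fun s x => if cf i x then (s.1, s.2 + 1) else (max s.1 s.2, 0)) (a, n)).2)
      = max a (pvScan cf .h i lo n) := by
  intro k
  induction k with
  | zero =>
    intro lo hlo _ a n
    have : lo = 19 := by simpa using hlo
    subst this
    rw [PySem.List.pyRange_one]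
    norm_num
    rw [pvScan]
    have : ¬ pvIns i 19 := by omega
    simp only [dif_neg this]
  | succ k ih =>
    intro lo hlo hlo0 a n
    have hlt : lo < 19 := by push_cast at hlo; omega
    rw [PySem.List.pyRange_one_cons hlt, List.foldl_cons]
    have hins : pvIns i lo := ⟨hi0, hi1, hlo0, hlt⟩
    by_cases hcf : cf i lo
    · simp only [hcf, if_true]
      rw [ih (lo + 1) (by push_cast at hlo ⊢; omega) (by omega) a (n + 1)]
      conv_rhs => rw [pvScan]
      simp only [dif_pos hins, hcf, if_true, pvDy, pvDx, add_zero]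
    · rw [if_neg hcf]
      rw [ih (lo + 1) (by push_cast at hlo ⊢; omega) (by omega) (max a n) 0]
      conv_rhs => rw [pvScan]
      simp only [dif_pos hins, pvDy, pvDx, add_zero]
      rw [if_neg hcf, max_assoc]

theorem pvColScan (cf : Int → Int → Bool) (i : Int) (hi0 : 0 ≤ i) (hi1 : i < 19) :
    ∀ (k : Nat) (lo : Int), lo = 19 - (k : Int) → 0 ≤ lo → ∀ a n : Int,
    (((PySem.List.pyRange lo 19 1).foldl
        (fun s y => if cf y i then (s.1, s.2 + 1) else (max s.1 s.2, 0)) (a, n)).1) ⊔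
      (((PySem.List.pyRange lo 19 1).foldl
        (fun s y => if cf y i then (s.1, s.2 + 1) else (max s.1 s.2, 0)) (a, n)).2)
      = max a (pvScan cf .v lo i n) := by
  intro k
  induction k with
  | zero =>
    intro lo hlo _ a n
    have : lo = 19 := by simpa using hlo
    subst this
    rw [PySem.List.pyRange_one]
    norm_num
    rw [pvScan]
    have : ¬ pvIns 19 i := by omega
    simp only [dif_neg this]
  | succ k ih =>
    intro lo hlo hlo0 a n
    have hlt : lo < 19 := by push_cast at hlo; omega
    rw [PySem.List.pyRange_one_cons hlt, List.foldl_cons]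
    have hins : pvIns lo i := ⟨hlo0, hlt, hi0, hi1⟩
    by_cases hcf : cf lo i
    · simp only [hcf, if_true]
      rw [ih (lo + 1) (by push_cast at hlo ⊢; omega) (by omega) a (n + 1)]
      conv_rhs => rw [pvScan]
      simp only [dif_pos hins, hcf, if_true, pvDy, pvDx, add_zero]
    · rw [if_neg hcf]
      rw [ih (lo + 1) (by push_cast at hlo ⊢; omega) (by omega) (max a n) 0]
      conv_rhs => rw [pvScan]
      simp only [dif_pos hins, pvDy, pvDx, add_zero]
      rw [if_neg hcf, max_assoc]


theorem pvWhileScan_d (cf : Int → Int → Bool) (y x a n : Int) :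
    max (pvWhileA cf 1 y x a n).1 (pvWhileA cf 1 y x a n).2 = max a (pvScan cf .d y x n) := by
  fun_induction pvWhileA cf 1 y x a n with
  | case1 y x a n hins hcf ih =>
    rw [ih]
    conv_rhs => rw [pvScan]
    simp only [dif_pos hins, pvDy, pvDx]
    rw [if_pos hcf]
  | case2 y x a n hins hcf ih =>
    rw [ih]
    conv_rhs => rw [pvScan]
    simp only [dif_pos hins, pvDy, pvDx]
    rw [if_neg hcf, max_assoc]
  | case3 y x a n hins =>
    conv_rhs => rw [pvScan]
    simp only [dif_neg hins]

theorem pvWhileScan_a (cf : Int → Int → Bool) (y x a n : Int) :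
    max (pvWhileA cf (-1) y x a n).1 (pvWhileA cf (-1) y x a n).2 = max a (pvScan cf .a y x n) := by
  fun_induction pvWhileA cf (-1) y x a n with
  | case1 y x a n hins hcf ih =>
    rw [ih]
    conv_rhs => rw [pvScan]
    simp only [dif_pos hins, pvDy, pvDx]
    rw [if_pos hcf]
  | case2 y x a n hins hcf ih =>
    rw [ih]
    conv_rhs => rw [pvScan]
    simp only [dif_pos hins, pvDy, pvDx]
    rw [if_neg hcf, max_assoc]
  | case3 y x a n hins =>
    conv_rhs => rw [pvScan]
    simp only [dif_neg hins]

theorem pvFuncA_le (cf : Int → Int → Bool) : pvFuncA cf ≤ pvMspec cf := by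
  unfold pvFuncA
  refine pvFoldLe _ _ _ ?dstep _ ?r1le
  case dstep =>
    intro m y hy hm
    refine pvFoldLe _ _ _ ?xstep _ hm
    case xstep =>
      intro m' x hx hm'
      simp only [pvWhileScan_d, pvWhileScan_a]
      exact max_le (max_le hm' (pvScan0_le_Mspec cf .d y x)) (pvScan0_le_Mspec cf .a y x)
  case r1le =>
    refine pvFoldLe _ _ _ ?istep _ (pvMspec_nonneg cf)
    case istep =>
      intro m i hi hm
      rw [PySem.List.mem_pyRange_one] at hi
      simp only [pvColScan cf i hi.1 hi.2 19 0 (by norm_num) (by norm_num),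
        pvRowScan cf i hi.1 hi.2 19 0 (by norm_num) (by norm_num)]
      exact max_le (max_le hm (pvScan0_le_Mspec cf .h i 0)) (pvScan0_le_Mspec cf .v 0 i)

theorem pvFuncA_ge_diag (cf : Int → Int → Bool) (y x : Int)
    (hy0 : 0 ≤ y) (hy1 : y < 19) (hx0 : 0 ≤ x) (hx1 : x < 19) :
    max (pvScan cf .d y x 0) (pvScan cf .a y x 0) ≤ pvFuncA cf := by
  unfold pvFuncA
  have hyin : y ∈ PySem.List.pyRange 0 19 1 := by rw [PySem.List.mem_pyRange_one]; omega
  have hxin : x ∈ PySem.List.pyRange 0 19 1 := by rw [PySem.List.mem_pyRange_one]; omega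
  have hmonox : ∀ (m x' : Int), m ≤ max (pvWhileA cf (-1) y x'
      (max (pvWhileA cf 1 y x' m 0).1 (pvWhileA cf 1 y x' m 0).2) 0).1
      (pvWhileA cf (-1) y x' (max (pvWhileA cf 1 y x' m 0).1 (pvWhileA cf 1 y x' m 0).2) 0).2 := by
    intro m x'
    rw [pvWhileScan_a, pvWhileScan_d]
    exact le_trans (le_max_left _ _) (le_max_left _ _)
  refine pvFoldGeMem _ _ ?ymono y hyin _ ?yv _
  case ymono =>
    intro m y'
    refine pvFoldGe _ _ ?_ m
    intro m' x'
    rw [pvWhileScan_a, pvWhileScan_d]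
    exact le_trans (le_max_left _ _) (le_max_left _ _)
  case yv =>
    intro m
    refine pvFoldGeMem _ _ ?xmono x hxin _ ?xv m
    case xmono =>
      intro m' x'
      rw [pvWhileScan_a, pvWhileScan_d]
      exact le_trans (le_max_left _ _) (le_max_left _ _)
    case xv =>
      intro m'
      rw [pvWhileScan_a, pvWhileScan_d]
      exact max_le (le_trans (le_max_right _ _) (le_max_left _ _)) (le_max_right _ _)


theorem pvScanFoldGe (g : Int → Bool) : ∀ (l : List Int) (a n : Int),
    a ≤ max (l.foldl (fun s x => if g x then (s.1, s.2 + 1) else (max s.1 s.2, 0)) (a, n)).1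
          (l.foldl (fun s x => if g x then (s.1, s.2 + 1) else (max s.1 s.2, 0)) (a, n)).2 := by
  intro l
  induction l with
  | nil => intro a n; exact le_max_left a n
  | cons b t ih =>
    intro a n
    rw [List.foldl_cons]
    by_cases hg : g b
    · rw [if_pos hg]; exact ih a (n + 1)
    · rw [if_neg hg]; exact le_trans (le_max_left a n) (ih (max a n) 0)

theorem pvFuncA_ge_rowcol (cf : Int → Int → Bool) (i : Int) (hi0 : 0 ≤ i) (hi1 : i < 19) :
    max (pvScan cf .h i 0 0) (pvScan cf .v 0 i 0) ≤ pvFuncA cf := by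
  unfold pvFuncA
  have hiin : i ∈ PySem.List.pyRange 0 19 1 := by rw [PySem.List.mem_pyRange_one]; omega
  have hr1 : max (pvScan cf .h i 0 0) (pvScan cf .v 0 i 0) ≤
      (PySem.List.pyRange 0 19 1).foldl (fun ans i =>
        let p1 := (PySem.List.pyRange 0 19 1).foldl
          (fun s x => if cf i x then (s.1, s.2 + 1) else (max s.1 s.2, 0)) (ans, 0)
        let a1 := max p1.1 p1.2
        let p2 := (PySem.List.pyRange 0 19 1).foldl
          (fun s y => if cf y i then (s.1, s.2 + 1) else (max s.1 s.2, 0)) (a1, 0)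
        max p2.1 p2.2) 0 := by
    refine pvFoldGeMem _ _ ?imono i hiin _ ?iv 0
    case imono =>
      intro m i'
      simp only
      exact le_trans (pvScanFoldGe (cf i') _ m 0) (pvScanFoldGe (fun y => cf y i') _ _ 0)
    case iv =>
      intro m
      simp only
      rw [pvColScan cf i hi0 hi1 19 0 (by norm_num) (by norm_num),
        pvRowScan cf i hi0 hi1 19 0 (by norm_num) (by norm_num)]
      exact max_le (le_trans (le_max_right m _) (le_max_left _ _)) (le_max_right _ _)
  refine le_trans hr1 (pvFoldGe _ _ ?_ _)
  intro m y'
  refine pvFoldGe _ _ ?_ m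
  intro m' x'
  rw [pvWhileScan_a, pvWhileScan_d]
  exact le_trans (le_max_left _ _) (le_max_left _ _)


theorem pvScan_start (cf : Int → Int → Bool) (D : PvDir) (sy sx : Int)
    (h0 : pvRp cf D sy sx = 0) : pvMaxRay cf D sy sx ≤ pvScan cf D sy sx 0 := by
  have h := pvScan_rp cf D sy sx
  rw [h0] at h
  rw [h]
  exact le_max_right _ _

theorem pvR_le_funcA (cf : Int → Int → Bool) (D : PvDir) (y x : Int)
    (hy0 : 0 ≤ y) (hy1 : y < 19) (hx0 : 0 ≤ x) (hx1 : x < 19) :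
    pvR cf D y x ≤ pvFuncA cf := by
  have hins : pvIns y x := ⟨hy0, hy1, hx0, hx1⟩
  cases D with
  | h =>
    have hall : ∀ j : Nat, j ≤ x.toNat → pvIns (y + j * pvDy PvDir.h) (0 + j * pvDx PvDir.h) := by
      intro j hj
      simp only [pvDy, pvDx, mul_zero, add_zero, mul_one, zero_add]
      refine ⟨hy0, hy1, by omega, by omega⟩
    have hchain := pvMaxRay_chain cf PvDir.h x.toNat y 0 hall
    rw [show ((x.toNat : Int)) = x from Int.toNat_of_nonneg hx0] at hchain
    simp only [pvDy, pvDx, mul_zero, add_zero, mul_one, zero_add] at hchain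
    have hrp : pvRp cf PvDir.h y 0 = 0 := by
      unfold pvRp
      rw [if_neg]
      simp only [pvDy, pvDx]
      omega
    refine le_trans (pvR_le_maxRay cf _ y x hins) (le_trans hchain (le_trans
      (pvScan_start cf _ y 0 hrp) (le_trans (le_max_left _ (pvScan cf .v 0 y 0))
        (pvFuncA_ge_rowcol cf y hy0 hy1))))
  | v =>
    have hall : ∀ j : Nat, j ≤ y.toNat → pvIns (0 + j * pvDy PvDir.v) (x + j * pvDx PvDir.v) := by
      intro j hj
      simp only [pvDy, pvDx, mul_zero, add_zero, mul_one, zero_add]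
      refine ⟨by omega, by omega, hx0, hx1⟩
    have hchain := pvMaxRay_chain cf PvDir.v y.toNat 0 x hall
    rw [show ((y.toNat : Int)) = y from Int.toNat_of_nonneg hy0] at hchain
    simp only [pvDy, pvDx, mul_zero, add_zero, mul_one, zero_add] at hchain
    have hrp : pvRp cf PvDir.v 0 x = 0 := by
      unfold pvRp
      rw [if_neg]
      simp only [pvDy, pvDx]
      omega
    refine le_trans (pvR_le_maxRay cf _ y x hins) (le_trans hchain (le_trans
      (pvScan_start cf _ 0 x hrp) (le_trans (le_max_right (pvScan cf .h x 0 0) _)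
        (pvFuncA_ge_rowcol cf x hx0 hx1))))
  | d =>
    set m : Int := min y x with hmdef
    have hm0 : 0 ≤ m := by omega
    have hall : ∀ j : Nat, j ≤ m.toNat →
        pvIns ((y - m) + j * pvDy PvDir.d) ((x - m) + j * pvDx PvDir.d) := by
      intro j hj
      simp only [pvDy, pvDx, mul_one]
      refine ⟨by omega, by omega, by omega, by omega⟩
    have hchain := pvMaxRay_chain cf PvDir.d m.toNat (y - m) (x - m) hall
    rw [show ((m.toNat : Int)) = m from Int.toNat_of_nonneg hm0] at hchain
    simp only [pvDy, pvDx, mul_one] at hchain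
    rw [show y - m + m = y from by ring, show x - m + m = x from by ring] at hchain
    have hrp : pvRp cf PvDir.d (y - m) (x - m) = 0 := by
      unfold pvRp
      rw [if_neg]
      simp only [pvDy, pvDx]
      omega
    refine le_trans (pvR_le_maxRay cf _ y x hins) (le_trans hchain (le_trans
      (pvScan_start cf _ (y - m) (x - m) hrp)
      (le_trans (le_max_left _ (pvScan cf .a (y - m) (x - m) 0))
        (pvFuncA_ge_diag cf (y - m) (x - m) (by omega) (by omega) (by omega) (by omega)))))
  | a =>
    set m : Int := min y (18 - x) with hmdef
    have hm0 : 0 ≤ m := by omega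
    have hall : ∀ j : Nat, j ≤ m.toNat →
        pvIns ((y - m) + j * pvDy PvDir.a) ((x + m) + j * pvDx PvDir.a) := by
      intro j hj
      simp only [pvDy, pvDx, mul_one]
      refine ⟨by omega, by omega, by omega, by omega⟩
    have hchain := pvMaxRay_chain cf PvDir.a m.toNat (y - m) (x + m) hall
    rw [show ((m.toNat : Int)) = m from Int.toNat_of_nonneg hm0] at hchain
    simp only [pvDy, pvDx, mul_one] at hchain
    rw [show y - m + m = y from by ring, show x + m + m * (-1) = x from by ring] at hchain
    have hrp : pvRp cf PvDir.a (y - m) (x + m) = 0 := by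
      unfold pvRp
      rw [if_neg]
      simp only [pvDy, pvDx]
      omega
    refine le_trans (pvR_le_maxRay cf _ y x hins) (le_trans hchain (le_trans
      (pvScan_start cf _ (y - m) (x + m) hrp)
      (le_trans (le_max_right (pvScan cf .d (y - m) (x + m) 0) _)
        (pvFuncA_ge_diag cf (y - m) (x + m) (by omega) (by omega) (by omega) (by omega)))))

theorem pvFuncA_nonneg (cf : Int → Int → Bool) : 0 ≤ pvFuncA cf := by
  unfold pvFuncA
  refine le_trans ?_ (pvFoldGe _ _ ?outer _)
  case outer =>
    intro m y'
    refine pvFoldGe _ _ ?_ m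
    intro m' x'
    rw [pvWhileScan_a, pvWhileScan_d]
    exact le_trans (le_max_left _ _) (le_max_left _ _)
  refine pvFoldGe _ _ ?_ 0
  intro m i'
  simp only
  exact le_trans (pvScanFoldGe (cf i') _ m 0) (pvScanFoldGe (fun y => cf y i') _ _ 0)

theorem pvFuncA_eq (cf : Int → Int → Bool) : pvFuncA cf = pvMspec cf := by
  refine le_antisymm (pvFuncA_le cf) ?_
  unfold pvMspec
  refine pvFoldLe _ _ _ ?dstep _ (pvFuncA_nonneg cf)
  case dstep =>
    intro m D hD hm
    refine pvFoldLe _ _ _ ?ystep _ hm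
    case ystep =>
      intro m' y hy hm'
      refine pvFoldLe _ _ _ ?xstep _ hm'
      case xstep =>
        intro m'' x hx hm''
        rw [PySem.List.mem_pyRange_one] at hy hx
        exact max_le hm'' (pvR_le_funcA cf D y x hy.1 hy.2 hx.1 hx.2)


-- dict invariant for B: after processing all cells lexicographically before (y, k),
-- the run table holds exactly the pvR values of those cells
def pvInv (cf : Int → Int → Bool) (D : PvDir) (dct : PySem.Dict (Int × Int) Int) (y k : Int) : Prop :=
  ∀ y' x' : Int, dct.getD (y', x') 0 =
    if pvIns y' x' ∧ (y' < y ∨ (y' = y ∧ x' < k)) then pvR cf D y' x' else 0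

theorem pvRowB (cf : Int → Int → Bool) (D : PvDir) (dy dx : Int)
    (hdy : dy = pvDy D) (hdx : dx = pvDx D) (y : Int) (hy0 : 0 ≤ y) (hy1 : y < 19) :
    ∀ (k : Nat) (lo : Int), lo = 19 - (k : Int) → 0 ≤ lo →
    ∀ (dct : PySem.Dict (Int × Int) Int) (b0 : Int), pvInv cf D dct y lo →
    ∃ dct', (PySem.List.pyRange lo 19 1).foldl (pvStepB cf dy dx y) (dct, b0)
        = (dct', (PySem.List.pyRange lo 19 1).foldl (fun m x => max m (pvR cf D y x)) b0) ∧
      pvInv cf D dct' y 19 := by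
  intro k
  induction k with
  | zero =>
    intro lo hlo _ dct b0 hInv
    have : lo = 19 := by simpa using hlo
    subst this
    rw [PySem.List.pyRange_one]
    norm_num
    exact hInv
  | succ k ih =>
    intro lo hlo hlo0 dct b0 hInv
    have hlt : lo < 19 := by push_cast at hlo; omega
    have hins : pvIns y lo := ⟨hy0, hy1, hlo0, hlt⟩
    rw [PySem.List.pyRange_one_cons hlt, List.foldl_cons, List.foldl_cons]
    -- the computed run value equals pvR
    have hr : (if cf y lo = true then dct.getD (y - dy, lo - dx) 0 + 1 else 0) = pvR cf D y lo := by
      by_cases hcf : cf y lo = true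
      · rw [if_pos hcf, pvR_eq_rp_add_one cf D y lo hins hcf]
        congr 1
        rw [hInv (y - dy) (lo - dx), hdy, hdx]
        unfold pvRp
        have hDpos : pvDy D = 1 ∨ (pvDy D = 0 ∧ pvDx D = 1) := by
          cases D <;> simp [pvDy, pvDx]
        split_ifs with h1 h2 h2
        · rfl
        · exfalso; obtain ⟨hA, hB⟩ := h1; exact h2 hA
        · exfalso
          apply h1
          refine ⟨h2, ?_⟩
          rcases hDpos with h | ⟨ha, hb⟩
          · left; omega
          · right; constructor <;> omega
        · rfl
      · rw [if_neg hcf, pvR_eq_zero cf D y lo (by tauto)]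
    have hstep : pvStepB cf dy dx y (dct, b0) lo
        = (dct.insert (y, lo) (pvR cf D y lo), max b0 (pvR cf D y lo)) := by
      simp only [pvStepB, hr]
      split_ifs with hcmp <;> simp only [Prod.mk.injEq, eq_self_iff_true, true_and] <;> omega
    rw [hstep]
    -- the updated dict satisfies the invariant with boundary lo+1
    have hInv' : pvInv cf D (dct.insert (y, lo) (pvR cf D y lo)) y (lo + 1) := by
      intro y' x'
      rw [PySem.Dict.getD_insert]
      by_cases heq : ((y' : Int), (x' : Int)) = ((y : Int), lo)
      · rw [if_pos heq]
        rw [Prod.mk.injEq] at heq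
        obtain ⟨rfl, rfl⟩ := heq
        rw [if_pos ⟨hins, Or.inr ⟨rfl, by omega⟩⟩]
      · rw [if_neg heq, hInv y' x']
        have hne : y' ≠ y ∨ x' ≠ lo := by
          rcases eq_or_ne y' y with rfl | hh
          · exact Or.inr (fun hx2 => heq (by rw [hx2]))
          · exact Or.inl hh
        split_ifs with h1 h2 h2
        · rfl
        · exfalso
          obtain ⟨hA, hB⟩ := h1
          exact h2 ⟨hA, by omega⟩
        · exfalso
          obtain ⟨hA, hB⟩ := h2
          apply h1
          refine ⟨hA, ?_⟩
          rcases hne with h | h <;> omega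
        · rfl
    exact ih (lo + 1) (by push_cast at hlo ⊢; omega) (by omega) _ _ hInv'

theorem pvInv_rowEnd (cf : Int → Int → Bool) (D : PvDir) (dct : PySem.Dict (Int × Int) Int)
    (y : Int) (h : pvInv cf D dct y 19) : pvInv cf D dct (y + 1) 0 := by
  intro y' x'
  rw [h y' x']
  split_ifs with h1 h2 h2
  · rfl
  · exfalso; obtain ⟨⟨a1, a2, a3, a4⟩, hB⟩ := h1; exact h2 ⟨⟨a1, a2, a3, a4⟩, by omega⟩
  · exfalso; obtain ⟨⟨a1, a2, a3, a4⟩, hB⟩ := h2; exact h1 ⟨⟨a1, a2, a3, a4⟩, by omega⟩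
  · rfl

theorem pvGridB (cf : Int → Int → Bool) (D : PvDir) (dy dx : Int)
    (hdy : dy = pvDy D) (hdx : dx = pvDx D) :
    ∀ (k : Nat) (lo : Int), lo = 19 - (k : Int) → 0 ≤ lo →
    ∀ (dct : PySem.Dict (Int × Int) Int) (b0 : Int), pvInv cf D dct lo 0 →
    ((PySem.List.pyRange lo 19 1).foldl (fun st y =>
        (PySem.List.pyRange 0 19 1).foldl (pvStepB cf dy dx y) st) (dct, b0)).2
      = (PySem.List.pyRange lo 19 1).foldl (fun m y =>
          (PySem.List.pyRange 0 19 1).foldl (fun m x => max m (pvR cf D y x)) m) b0 := by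
  intro k
  induction k with
  | zero =>
    intro lo hlo _ dct b0 _
    have : lo = 19 := by simpa using hlo
    subst this
    rw [PySem.List.pyRange_one]
    norm_num
  | succ k ih =>
    intro lo hlo hlo0 dct b0 hInv
    have hlt : lo < 19 := by push_cast at hlo; omega
    rw [PySem.List.pyRange_one_cons hlt, List.foldl_cons, List.foldl_cons]
    obtain ⟨dct', hEq, hInv'⟩ := pvRowB cf D dy dx hdy hdx lo hlo0 hlt 19 0 (by norm_num)
      (by norm_num) dct b0 hInv
    rw [hEq]
    exact ih (lo + 1) (by push_cast at hlo ⊢; omega) (by omega) dct' _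
      (pvInv_rowEnd cf D dct' lo hInv')

theorem pvInv_empty (cf : Int → Int → Bool) (D : PvDir) :
    pvInv cf D PySem.Dict.empty 0 0 := by
  intro y' x'
  rw [PySem.Dict.getD_empty, if_neg]
  rintro ⟨⟨a1, a2, a3, a4⟩, hB⟩
  omega

theorem pvFoldl4 {α β : Type} (f : β → α → β) (i : β) (a b c d : α) :
    List.foldl f i [a, b, c, d] = f (f (f (f i a) b) c) d := rfl

theorem pvFuncB_eq (cf : Int → Int → Bool) : pvFuncB cf = pvMspec cf := by
  unfold pvFuncB pvMspec pvDirs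
  rw [pvFoldl4, pvFoldl4]
  simp only []
  rw [pvGridB cf PvDir.h 0 1 rfl rfl 19 0 (by norm_num) (by norm_num) _ _ (pvInv_empty cf _)]
  rw [pvGridB cf PvDir.v 1 0 rfl rfl 19 0 (by norm_num) (by norm_num) _ _ (pvInv_empty cf _)]
  rw [pvGridB cf PvDir.d 1 1 rfl rfl 19 0 (by norm_num) (by norm_num) _ _ (pvInv_empty cf _)]
  rw [pvGridB cf PvDir.a 1 (-1) rfl rfl 19 0 (by norm_num) (by norm_num) _ _ (pvInv_empty cf _)]

theorem pvFuncAB (cf : Int → Int → Bool) : pvFuncA cf = pvFuncB cf :=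
  (pvFuncA_eq cf).trans (pvFuncB_eq cf).symm


-- ----- wrapper lemmas: cell predicates agree, mutate-and-restore = skip parameter -----

theorem pvGet_neg (board : List (List String)) (y x : Int) (h : ¬(0 ≤ y ∧ 0 ≤ x)) :
    pvGet board y x = "" := by
  unfold pvGet; rw [if_neg h]

theorem pvCf_lose (board : List (List String)) (lose : String)
    (hloseE : (("" : String) == lose) = false) :
    (fun y x => pvGet board y x == lose)
      = (fun y x => pvGet board y x == lose && !(y == (-1 : Int) && x == (-1 : Int))) := by
  funext y x
  by_cases h : 0 ≤ y ∧ 0 ≤ x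
  · have hy : (y == (-1 : Int)) = false := by simp; omega
    rw [hy, Bool.false_and, Bool.not_false, Bool.and_true]
  · rw [pvGet_neg board y x h, hloseE, Bool.false_and]

theorem pvGet_pvSet (board : List (List String)) (y x : Int) (s : String)
    (hy : 0 ≤ y) (hx : 0 ≤ x) (hne : pvGet board y x ≠ "") :
    ∀ y' x' : Int, pvGet (pvSet board y x s) y' x'
      = if y' = y ∧ x' = x then s else pvGet board y' x' := by
  have hget : pvGet board y x = (board.getD y.toNat []).getD x.toNat "" := by
    unfold pvGet; rw [if_pos ⟨hy, hx⟩]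
  intro y' x'
  by_cases h' : 0 ≤ y' ∧ 0 ≤ x'
  · unfold pvGet pvSet
    rw [if_pos h', if_pos h']
    by_cases hyy : y' = y
    · subst hyy
      rcases hrow : board[y'.toNat]? with _ | row
      · exfalso
        apply hne
        rw [hget]
        simp [List.getD_eq_getElem?_getD, hrow]
      · by_cases hxx : x' = x
        · subst hxx
          rcases hcell : row[x'.toNat]? with _ | c
          · exfalso
            apply hne
            rw [hget]
            simp [List.getD_eq_getElem?_getD, hrow, hcell]
          · simp [List.getD_eq_getElem?_getD, List.getElem?_mapIdx, hrow, hcell,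
              Int.toNat_of_nonneg hy, Int.toNat_of_nonneg hx]
        · rw [if_neg (fun hc : _ ∧ x' = x => hxx hc.2)]
          simp [List.getD_eq_getElem?_getD, List.getElem?_mapIdx, hrow,
            Int.toNat_of_nonneg hy, Int.toNat_of_nonneg h'.2, hxx]
    · rw [if_neg (fun hc : y' = y ∧ _ => hyy hc.1)]
      simp only [List.getD_eq_getElem?_getD, List.getElem?_mapIdx]
      rcases hrow : board[y'.toNat]? with _ | row
      · simp
      · simp [Int.toNat_of_nonneg h'.1, hyy]
  · rw [pvGet_neg _ y' x' h', pvGet_neg board y' x' h',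
      if_neg (by rintro ⟨rfl, rfl⟩; exact h' ⟨hy, hx⟩)]

theorem pvCf_win (board : List (List String)) (win : String) (y x : Int)
    (hy0 : 0 ≤ y) (hy1 : y < 19) (hx0 : 0 ≤ x) (hx1 : x < 19)
    (hwinE : (("" : String) == win) = false)
    (hdot : (("." : String) == win) = false)
    (hcw : (pvGet board y x == win) = true) :
    (fun y' x' => pvGet (pvSet board y x ".") y' x' == win)
      = (fun y' x' => pvGet board y' x' == win && !(y' == y && x' == x)) := by
  have hne : pvGet board y x ≠ "" := by
    intro hc
    rw [hc, hwinE] at hcw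
    exact Bool.false_ne_true hcw
  funext y' x'
  rw [pvGet_pvSet board y x "." hy0 hx0 hne y' x']
  by_cases he : y' = y ∧ x' = x
  · rw [if_pos he, hdot]
    have h1 : (y' == y) = true := by simp [he.1]
    have h2 : (x' == x) = true := by simp [he.2]
    rw [h1, h2, Bool.and_true, Bool.not_true, Bool.and_false]
  · rw [if_neg he]
    have : (y' == y && x' == x) = false := by
      rcases not_and_or.mp he with h | h <;> simp [h]
    rw [this, Bool.not_false, Bool.and_true]

-- A's early-return double loop (mutate, test, restore) is the double 'any' of B with the skip form
theorem pvLoopAny (board : List (List String)) (win : String)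
    (hfb : ∀ y x : Int, 0 ≤ y → y < 19 → 0 ≤ x → x < 19 →
      (pvGet board y x == win) = true →
      funcA (pvSet board y x ".") win = funcB board win y x) :
    (PySem.List.pyRange 0 19 1).foldl (fun found y =>
        (PySem.List.pyRange 0 19 1).foldl (fun found x =>
          if found then found
          else if ¬ (pvGet board y x == win) then found
          else if funcA (pvSet board y x ".") win < 5 then true
          else found) found) false
      = (PySem.List.pyRange 0 19 1).any (fun y =>
          (PySem.List.pyRange 0 19 1).any (fun x =>
            pvGet board y x == win && decide (funcB board win y x < 5))) := by
  rw [PySem.List.foldl_congr_mem'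
    (g := fun found y => if (PySem.List.pyRange 0 19 1).any
        (fun x => pvGet board y x == win && decide (funcB board win y x < 5)) then true
      else found)]
  · rw [PySem.List.foldl_if_true_eq, Bool.false_or]
  · intro y hy acc
    rw [PySem.List.mem_pyRange_one] at hy
    rw [PySem.List.foldl_congr_mem'
      (g := fun found x => if (pvGet board y x == win && decide (funcB board win y x < 5)) then true
        else found)]
    · rw [PySem.List.foldl_if_true_eq]
      cases acc <;> cases hany : (PySem.List.pyRange 0 19 1).any
          (fun x => pvGet board y x == win && decide (funcB board win y x < 5)) <;> simp
    · intro x hx acc'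
      rw [PySem.List.mem_pyRange_one] at hx
      cases acc' with
      | true => simp
      | false =>
        cases hcw : (pvGet board y x == win) with
        | false => simp
        | true =>
          rw [hfb y x hy.1 hy.2 hx.1 hx.2 hcw]
          simp

theorem pvFuncLose (board : List (List String)) (lose : String)
    (hloseE : (("" : String) == lose) = false) :
    funcA board lose = funcB board lose (-1) (-1) := by
  unfold funcA funcB
  rw [pvFuncAB, pvCf_lose board lose hloseE]

theorem pvFuncWin (board : List (List String)) (win : String) (y x : Int)
    (hy0 : 0 ≤ y) (hy1 : y < 19) (hx0 : 0 ≤ x) (hx1 : x < 19)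
    (hwinE : (("" : String) == win) = false)
    (hdot : (("." : String) == win) = false)
    (hcw : (pvGet board y x == win) = true) :
    funcA (pvSet board y x ".") win = funcB board win y x := by
  unfold funcA funcB
  rw [pvFuncAB, pvCf_win board win y x hy0 hy1 hx0 hx1 hwinE hdot hcw]

-- ===== VERDICT (by name: the statement is the Claim_ definition above) =====
theorem solve_spec : Claim_equal_solve := by
  intro b w board _ _
  unfold Spec_solve solve solve_alt
  by_cases h1 : b ≠ w ∧ b ≠ w + 1
  · rw [if_pos h1, if_pos h1]
  · rw [if_neg h1, if_neg h1]
    by_cases h2 : b = 0 ∧ w = 0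
    · rw [if_pos h2, if_pos h2]
    · rw [if_neg h2, if_neg h2]
      simp only []
      by_cases hbw : b = w
      · simp only [if_pos hbw]
        rw [pvFuncLose board "o" (by decide)]
        split_ifs with h3
        · rfl
        · exact pvLoopAny board "x" (fun y x hy0 hy1 hx0 hx1 hcw =>
            pvFuncWin board "x" y x hy0 hy1 hx0 hx1 (by decide) (by decide) hcw)
      · simp only [if_neg hbw]
        rw [pvFuncLose board "x" (by decide)]
        split_ifs with h3
        · rfl
        · exact pvLoopAny board "o" (fun y x hy0 hy1 hx0 hx1 hcw =>
            pvFuncWin board "o" y x hy0 hy1 hx0 hx1 (by decide) (by decide) hcw)
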